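-- pv_equiv track=rewrite | github.com/huypq1709/PFP191 | 29-5-2024/ex59.py | find_last_odd_number
-- ===== SOURCE A (Python) =====
-- def find_last_odd_number(aList):
--     lst = []
--     lst.extend(map(int, aList.split()))
--     lst.reverse()
--     for x in lst:
--         if x % 2 != 0:
--             return x
--     return lst[0]
-- ===== SOURCE B (Python) =====
-- def find_last_odd_number(aList):
--     nums = [int(t) for t in aList.split()]
--     odds = [x for x in nums if x % 2 != 0]
--     return odds[-1] if odds else nums[-1]
-- ===== Notes on version B (the rewrite author's own statement) =====
-- stated objective: alternative
-- what changed: Replaces A's reverse-the-list-then-return-first-odd short-circuit scan with a staged filter: collect all odd numbers into a list and return its last element, falling back to nums[-1] when no odds exist (no reversal, no early return).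
import Mathlib
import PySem

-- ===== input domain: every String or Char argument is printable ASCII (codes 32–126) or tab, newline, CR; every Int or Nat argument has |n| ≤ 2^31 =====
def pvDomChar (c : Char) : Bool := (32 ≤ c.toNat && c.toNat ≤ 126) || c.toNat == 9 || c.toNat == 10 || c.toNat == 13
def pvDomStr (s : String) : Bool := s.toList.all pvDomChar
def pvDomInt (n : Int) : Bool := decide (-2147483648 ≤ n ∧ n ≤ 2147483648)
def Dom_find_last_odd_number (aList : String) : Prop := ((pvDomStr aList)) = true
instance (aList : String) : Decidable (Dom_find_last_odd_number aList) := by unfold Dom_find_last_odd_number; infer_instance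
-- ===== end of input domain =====

-- B replaces A's reverse-then-first-odd short-circuit scan with a staged filter:
-- collect all odds, return the last one, else nums[-1] (objective: alternative).

-- ===== PORT A =====
-- lst = list(map(int, aList.split())); lst.reverse(); first odd of reversed list, else lst[0]
def find_last_odd_number (aList : String) : Int :=
  let lst := ((PySem.Str.split₀ aList).map (fun t => (PySem.Int.ofStr? t).getD 0)).reverse
  match lst.find? (fun x => PySem.Int.mod x 2 != 0) with
  | some x => x
  | none => (PySem.List.pyGet? lst 0).getD 0

-- ===== PORT B =====
-- odds = [x for x in nums if x % 2 != 0]; odds[-1] if odds else nums[-1]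
def find_last_odd_number_alt (aList : String) : Int :=
  let nums := (PySem.Str.split₀ aList).map (fun t => (PySem.Int.ofStr? t).getD 0)
  let odds := nums.filter (fun x => PySem.Int.mod x 2 != 0)
  if odds ≠ [] then (PySem.List.pyGet? odds (-1)).getD 0
  else (PySem.List.pyGet? nums (-1)).getD 0

-- ===== PRECONDITION & SPEC =====
-- Pre_ excludes exactly the inputs where A raises: a token not parseable by int()
-- (ValueError) or a string with no tokens (IndexError on lst[0]).
def Pre_find_last_odd_number (aList : String) : Prop :=
  PySem.Str.split₀ aList ≠ [] ∧
  ∀ t ∈ PySem.Str.split₀ aList, (PySem.Int.ofStr? t).isSome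
instance (aList : String) : Decidable (Pre_find_last_odd_number aList) := by
  unfold Pre_find_last_odd_number; infer_instance

def pvWitness_find_last_odd_number : String := "2 4 5 6"

def Spec_find_last_odd_number (aList : String) (out : Int) : Prop := out = find_last_odd_number_alt aList
instance (aList : String) (out : Int) : Decidable (Spec_find_last_odd_number aList out) := by unfold Spec_find_last_odd_number; infer_instance

-- ===== CLAIM (what is proved, stated in full; the proofs are below) =====
def Claim_equal_find_last_odd_number : Prop := ∀ (aList : String), Dom_find_last_odd_number aList → Pre_find_last_odd_number aList → Spec_find_last_odd_number aList (find_last_odd_number aList)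

-- ===== LEMMAS AND PROOFS =====

-- first match in the reversed list = last element of the filtered list
theorem find_rev_eq_getLast_filter (p : Int → Bool) (l : List Int) :
    l.reverse.find? p = (l.filter p).getLast? := by
  induction l with
  | nil => simp
  | cons x l ih =>
    simp only [List.reverse_cons, List.find?_append, ih, List.filter_cons]
    cases h : (l.filter p).getLast? with
    | some y => split_ifs <;> simp_all [List.getLast?_cons]
    | none =>
      have hnil : l.filter p = [] := List.getLast?_eq_none_iff.mp h
      split_ifs with hp <;> simp [List.find?, hp, hnil]

-- odds[-1] is the last element of odds
theorem pyGet_neg_one_getLast (l : List Int) :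
    PySem.List.pyGet? l (-1) = l.getLast? := by
  simp [PySem.List.pyGet?_neg_one]

-- fallback agreement: first of the reversed list = element -1 of the list
theorem pyGet_rev_zero (l : List Int) :
    (PySem.List.pyGet? l.reverse 0).getD 0 = l.getLast?.getD 0 := by
  simp [PySem.List.pyGet?_zero, ← List.head?_eq_getElem?, List.head?_reverse]

-- ===== VERDICT (by name: the statement is the Claim_ definition above) =====
theorem find_last_odd_number_spec : Claim_equal_find_last_odd_number := by
  intro aList _ _
  unfold Spec_find_last_odd_number find_last_odd_number find_last_odd_number_alt
  simp only [find_rev_eq_getLast_filter, pyGet_neg_one_getLast]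
  set nums := (PySem.Str.split₀ aList).map (fun t => (PySem.Int.ofStr? t).getD 0)
  cases hlast : (nums.filter (fun x => PySem.Int.mod x 2 != 0)).getLast? with
  | some x =>
    have hne : nums.filter (fun x => PySem.Int.mod x 2 != 0) ≠ [] := by
      intro h; rw [h] at hlast; simp at hlast
    rw [if_pos hne]
    rfl
  | none =>
    have hnil : nums.filter (fun x => PySem.Int.mod x 2 != 0) = [] :=
      List.getLast?_eq_none_iff.mp hlast
    simp only [hnil, ne_eq, not_true_eq_false, if_false]
    exact pyGet_rev_zero nums
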